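-- pv_equiv track=rewrite | github.com/pypi-data/pypi-mirror-401 | packages/tracekit/tracekit-0.3.0.tar.gz/tracekit-0.3.0/tests/unit/analyzers/protocols/test_lin.py | generate_uart_byte
-- ===== SOURCE A (Python) =====
-- def generate_uart_byte(
--     byte_val: int,
--     samples_per_bit: int = 20,
-- ) -> list[bool]:
--     """Generate UART-style byte with start and stop bits.
--
--     Args:
--         byte_val: Byte value (0-255).
--         samples_per_bit: Samples per bit period.
--
--     Returns:
--         List of boolean values representing the byte signal.
--     """
--     bits = []
--
--     # Start bit (dominant = False)
--     bits.extend([False] * samples_per_bit)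
--
--     # Data bits (LSB first)
--     for i in range(8):
--         bit = bool((byte_val >> i) & 1)
--         bits.extend([bit] * samples_per_bit)
--
--     # Stop bit (recessive = True)
--     bits.extend([True] * samples_per_bit)
--
--     return bits
-- ===== SOURCE B (Python) =====
-- def generate_uart_byte(
--     byte_val: int,
--     samples_per_bit: int = 20,
-- ) -> list[bool]:
--     # B: pack the whole UART frame (start bit 0, 8 data bits LSB-first, stop bit 1)
--     # into one integer, then compute every output sample directly from its index:
--     # sample j belongs to bit j // samples_per_bit of the frame.
--     frame = (byte_val % 256) * 2 + 512
--     n = 10 * samples_per_bit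
--     return [(frame // 2 ** (j // samples_per_bit)) % 2 == 1 for j in range(n)]
-- ===== Notes on version B (the rewrite author's own statement) =====
-- stated objective: alternative
-- what changed: B packs the whole frame (start bit, 8 data bits, stop bit) into one integer (byte_val % 256)*2 + 512 and computes each of the 10*samples_per_bit output samples directly from its index j as bit j // samples_per_bit of that integer, instead of A's ten successive extend calls with per-bit replication.
import Mathlib
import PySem

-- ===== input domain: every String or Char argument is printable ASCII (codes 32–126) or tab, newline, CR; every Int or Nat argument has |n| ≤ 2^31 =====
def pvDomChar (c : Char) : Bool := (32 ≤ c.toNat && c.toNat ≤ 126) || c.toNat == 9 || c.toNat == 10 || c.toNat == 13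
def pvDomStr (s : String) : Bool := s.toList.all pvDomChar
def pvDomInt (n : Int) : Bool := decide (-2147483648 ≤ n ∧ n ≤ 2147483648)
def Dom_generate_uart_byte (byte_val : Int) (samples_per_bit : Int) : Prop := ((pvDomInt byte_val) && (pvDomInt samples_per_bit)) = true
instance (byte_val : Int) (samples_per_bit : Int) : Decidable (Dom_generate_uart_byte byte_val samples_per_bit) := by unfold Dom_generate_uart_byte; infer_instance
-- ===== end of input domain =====

-- B packs the frame into one integer and computes each sample from its index by
-- division, instead of A's ten successive per-bit extend calls (objective: alternative).

-- ===== PORT A =====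
-- bool((byte_val >> i) & 1): Python '>>' on int is floor division by 2^i (exact also for
-- negatives), ported as PySem.Int.floordiv; '& 1' as PySem.Int.band; bool(x) as x ≠ 0.
def pyBitA (byte_val : Int) (i : Int) : Bool :=
  decide (PySem.Int.band (PySem.Int.floordiv byte_val (2 ^ i.toNat)) 1 ≠ 0)

-- [x]*n for possibly negative n is []; ported as List.replicate n.toNat x (exact).
def generate_uart_byte (byte_val : Int) (samples_per_bit : Int) : List Bool :=
  let bits : List Bool := []
  let bits := bits ++ List.replicate samples_per_bit.toNat false
  let bits := (PySem.List.pyRange 0 8 1).foldl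
    (fun acc i => acc ++ List.replicate samples_per_bit.toNat (pyBitA byte_val i)) bits
  bits ++ List.replicate samples_per_bit.toNat true

-- ===== PORT B =====
-- '2 ** e' is only evaluated with e = j // samples_per_bit ≥ 0 (j ≥ 0 and the range is
-- nonempty only for samples_per_bit > 0), so '.toNat' on the exponent is exact.
def generate_uart_byte_alt (byte_val : Int) (samples_per_bit : Int) : List Bool :=
  let frame := PySem.Int.mod byte_val 256 * 2 + 512
  let n := 10 * samples_per_bit
  (PySem.List.pyRange 0 n 1).map (fun j =>
    decide (PySem.Int.mod
      (PySem.Int.floordiv frame (2 ^ (PySem.Int.floordiv j samples_per_bit).toNat)) 2 = 1))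

-- ===== PRECONDITION & SPEC =====
def Spec_generate_uart_byte (byte_val : Int) (samples_per_bit : Int) (out : List Bool) : Prop := out = generate_uart_byte_alt byte_val samples_per_bit
instance (byte_val : Int) (samples_per_bit : Int) (out : List Bool) : Decidable (Spec_generate_uart_byte byte_val samples_per_bit out) := by unfold Spec_generate_uart_byte; infer_instance

-- ===== CLAIM (what is proved, stated in full; the proofs are below) =====
def Claim_equal_generate_uart_byte : Prop := ∀ (byte_val : Int) (samples_per_bit : Int), Dom_generate_uart_byte byte_val samples_per_bit → Spec_generate_uart_byte byte_val samples_per_bit (generate_uart_byte byte_val samples_per_bit)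

-- ===== LEMMAS AND PROOFS =====
theorem pyRange_eight : PySem.List.pyRange 0 8 1 = [0, 1, 2, 3, 4, 5, 6, 7] := by decide

-- B's sample at Nat index j, divisor K > 0, written over Nat bit index.
def gBit (byte_val : Int) (n : Nat) : Bool :=
  decide ((PySem.Int.mod byte_val 256 * 2 + 512) / 2 ^ n % 2 = 1)

-- expand-by-index equals flatMap of replicates
theorem rangeMulMap (g : Nat → Bool) (k : Nat) :
    ∀ n, (List.range (n * k)).map (fun j => g (j / k))
      = (List.range n).flatMap (fun i => List.replicate k (g i)) := by
  rcases Nat.eq_zero_or_pos k with hk | hk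
  · intro n; subst hk; simp
  · intro n
    induction n with
    | zero => simp
    | succ n ih =>
      rw [Nat.succ_mul, List.range_add, List.map_append, ih, List.range_succ,
        List.flatMap_append, List.flatMap_singleton]
      congr 1
      have : ∀ t ∈ List.range k, ((fun j => g (j / k)) ∘ fun x => n * k + x) t = g n := by
        intro t ht
        have ht' := List.mem_range.mp ht
        simp only [Function.comp_apply]
        congr 1
        rw [Nat.add_comm, Nat.add_mul_div_right _ _ hk, Nat.div_eq_of_lt ht']
        omega
      rw [List.map_map, List.map_congr_left this]
      simp

theorem gBit_start (bv : Int) : gBit bv 0 = false := by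
  unfold gBit
  have h := PySem.Int.mod_eq_emod_of_pos (a := bv) (b := 256) (by norm_num)
  simp only [h, pow_zero]
  simp only [decide_eq_false_iff_not]
  omega

theorem gBit_stop (bv : Int) : gBit bv 9 = true := by
  unfold gBit
  have h := PySem.Int.mod_eq_emod_of_pos (a := bv) (b := 256) (by norm_num)
  simp only [h]
  norm_num
  omega

theorem gBit_data (bv : Int) (i : Nat) (hi : i < 8) :
    gBit bv (i + 1) = pyBitA bv (i : Int) := by
  unfold gBit pyBitA
  have h256 := PySem.Int.mod_eq_emod_of_pos (a := bv) (b := 256) (by norm_num)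
  have hdiv : ∀ (a : Int) (n : Nat), PySem.Int.floordiv a (2 ^ n) = a / 2 ^ n := by
    intro a n; exact PySem.Int.floordiv_eq_ediv_of_pos (by positivity)
  rw [PySem.Int.band_one]
  have hmod2 : ∀ a : Int, PySem.Int.mod a 2 = a % 2 := fun a =>
    PySem.Int.mod_eq_emod_of_pos (by norm_num)
  simp only [h256, hdiv, hmod2, Int.toNat_natCast, decide_eq_decide]
  interval_cases i <;> (norm_num; omega)

theorem alt_eq_flatMap (bv : Int) (K : Nat) :
    generate_uart_byte_alt bv (K : Int)
      = (List.range 10).flatMap (fun i => List.replicate K (gBit bv i)) := by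
  have h10 : (10 : Int) * (K : Int) = ((10 * K : Nat) : Int) := by push_cast; ring
  simp only [generate_uart_byte_alt]
  rw [h10, PySem.List.pyRange_zero_natCast, List.map_map]
  rw [← rangeMulMap (gBit bv) K 10]
  apply List.map_congr_left
  intro j hj
  simp only [Function.comp_apply, gBit]
  have hfd : PySem.Int.floordiv (j : Int) (K : Int) = ((j / K : Nat) : Int) := by
    exact_mod_cast PySem.Int.floordiv_natCast j K
  rw [hfd, Int.toNat_natCast]
  congr 1
  have h1 := PySem.Int.floordiv_eq_ediv_of_pos
    (a := PySem.Int.mod bv 256 * 2 + 512) (b := (2 : Int) ^ (j / K)) (by positivity)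
  have h2 := PySem.Int.mod_eq_emod_of_pos
    (a := PySem.Int.floordiv (PySem.Int.mod bv 256 * 2 + 512) (2 ^ (j / K)))
    (b := (2 : Int)) (by norm_num)
  rw [h2, h1]

-- ===== VERDICT (by name: the statement is the Claim_ definition above) =====
theorem generate_uart_byte_spec : Claim_equal_generate_uart_byte := by
  intro bv spb _
  show generate_uart_byte bv spb = generate_uart_byte_alt bv spb
  by_cases hspb : spb ≤ 0
  · have hz : spb.toNat = 0 := Int.toNat_of_nonpos hspb
    have hr : PySem.List.pyRange 0 (10 * spb) 1 = [] :=
      PySem.List.pyRange_one_eq_nil (by omega)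
    simp [generate_uart_byte, generate_uart_byte_alt, hz, hr, pyRange_eight]
  · rw [not_le] at hspb
    obtain ⟨K, hK, rfl⟩ : ∃ K : Nat, 0 < K ∧ spb = (K : Int) :=
      ⟨spb.toNat, by omega, by omega⟩
    rw [alt_eq_flatMap bv K]
    have hrep : ∀ i : Nat, i < 8 → pyBitA bv (i : Int) = gBit bv (i + 1) := by
      intro i hi; rw [gBit_data bv i hi]
    have e0 := hrep 0 (by norm_num); have e1 := hrep 1 (by norm_num)
    have e2 := hrep 2 (by norm_num); have e3 := hrep 3 (by norm_num)
    have e4 := hrep 4 (by norm_num); have e5 := hrep 5 (by norm_num)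
    have e6 := hrep 6 (by norm_num); have e7 := hrep 7 (by norm_num)
    norm_num at e0 e1 e2 e3 e4 e5 e6 e7
    simp only [generate_uart_byte, pyRange_eight, List.foldl, Int.toNat_natCast]
    rw [e0, e1, e2, e3, e4, e5, e6, e7,
      show List.range 10 = [0, 1, 2, 3, 4, 5, 6, 7, 8, 9] from rfl]
    simp [List.flatMap, List.flatten, gBit_start, gBit_stop]
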